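-- pv_equiv track=rewrite | github.com/psenzee/MuGen | src/MusicUtils.py | xyzw_map_by_chord_count
-- ===== SOURCE A (Python) =====
-- def xyzw_map_by_chord_count(count, templates):
--   if count < 1 or not count in [1, 2, 4]:
--     raise RuntimeError("Chord count can only be 1, 2 or 4")
--   map = [
--     None,
--     { 'a' : 'X', 'b' : 'X', 'c' : 'X', 'd' : 'X' },
--     { 'a' : 'X', 'b' : 'X', 'c' : 'Y', 'd' : 'Y' },
--     None,
--     { 'a' : 'X', 'b' : 'Y', 'c' : 'Z', 'd' : 'W' }
--   ][count]
--   copy = []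
--   for t in templates:
--     for k, v in map.items():
--       t = t.replace("{%s}" % k, v)
--     copy.append(t)
--   return copy
-- ===== SOURCE B (Python) =====
-- def xyzw_map_by_chord_count(count, templates):
--   if count not in (1, 2, 4):
--     raise RuntimeError("Chord count can only be 1, 2 or 4")
--   mapping = {1: {'a': 'X', 'b': 'X', 'c': 'X', 'd': 'X'},
--              2: {'a': 'X', 'b': 'X', 'c': 'Y', 'd': 'Y'},
--              4: {'a': 'X', 'b': 'Y', 'c': 'Z', 'd': 'W'}}[count]
--   out = []
--   for t in templates:
--     pieces = []
--     i, n = 0, len(t)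
--     while i < n:
--       if t[i] == '{' and i + 2 < n and t[i + 2] == '}' and t[i + 1] in mapping:
--         pieces.append(mapping[t[i + 1]])
--         i += 3
--       else:
--         pieces.append(t[i])
--         i += 1
--     out.append(''.join(pieces))
--   return out
-- ===== Notes on version B (the rewrite author's own statement) =====
-- stated objective: alternative
-- what changed: B replaces A's four sequential full-string str.replace passes per template with a single left-to-right scan that recognises '{k}' placeholders and substitutes in one pass.
import Mathlib
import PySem

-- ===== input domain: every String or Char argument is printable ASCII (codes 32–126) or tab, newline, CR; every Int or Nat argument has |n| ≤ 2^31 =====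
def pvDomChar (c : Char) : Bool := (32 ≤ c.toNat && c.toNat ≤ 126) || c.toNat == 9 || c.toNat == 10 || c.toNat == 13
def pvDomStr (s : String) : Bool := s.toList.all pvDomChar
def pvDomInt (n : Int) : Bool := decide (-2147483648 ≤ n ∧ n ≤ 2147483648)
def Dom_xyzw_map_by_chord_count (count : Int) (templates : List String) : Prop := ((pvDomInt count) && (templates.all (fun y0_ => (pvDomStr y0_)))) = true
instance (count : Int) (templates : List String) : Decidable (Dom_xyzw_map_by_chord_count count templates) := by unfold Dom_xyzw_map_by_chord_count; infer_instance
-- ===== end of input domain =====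

-- B replaces A's four sequential full-string str.replace passes per template with a single
-- left-to-right scan that substitutes '{k}' placeholders in one pass (alternative decomposition).

-- ===== PORT A =====
def xyzw_map_by_chord_count (count : Int) (templates : List String) : List String :=
  if count < 1 ∨ ¬(count = 1 ∨ count = 2 ∨ count = 4) then [] -- Python raises RuntimeError here; excluded by Pre_
  else
    let map : List (String × String) :=
      if count = 1 then [("a", "X"), ("b", "X"), ("c", "X"), ("d", "X")]
      else if count = 2 then [("a", "X"), ("b", "X"), ("c", "Y"), ("d", "Y")]
      else [("a", "X"), ("b", "Y"), ("c", "Z"), ("d", "W")]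
    templates.foldl (fun copy t =>
      copy ++ [map.foldl (fun t kv => PySem.Str.replace t ("{" ++ kv.1 ++ "}") kv.2) t]) []

-- ===== PORT B =====
-- the single left-to-right scan of Source B's while loop (i advances by 3 on a placeholder, else by 1)
def pvScan (m : PySem.Dict Char Char) : List Char → List Char
  | c1 :: c2 :: c3 :: rest =>
    if c1 = '{' ∧ c3 = '}' ∧ m.contains c2 then
      m.getD c2 c2 :: pvScan m rest
    else
      c1 :: pvScan m (c2 :: c3 :: rest)
  | l => l

def xyzw_map_by_chord_count_alt (count : Int) (templates : List String) : List String :=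
  if ¬(count = 1 ∨ count = 2 ∨ count = 4) then [] -- Python raises RuntimeError here; excluded by Pre_
  else
    let mapping : PySem.Dict Char Char :=
      if count = 1 then PySem.Dict.ofList [('a', 'X'), ('b', 'X'), ('c', 'X'), ('d', 'X')]
      else if count = 2 then PySem.Dict.ofList [('a', 'X'), ('b', 'X'), ('c', 'Y'), ('d', 'Y')]
      else PySem.Dict.ofList [('a', 'X'), ('b', 'Y'), ('c', 'Z'), ('d', 'W')]
    templates.map (fun t => String.ofList (pvScan mapping t.toList))

-- ===== PRECONDITION & SPEC =====
-- Pre_ excludes exactly the counts on which A raises RuntimeError ("Chord count can only be 1, 2 or 4").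
def Pre_xyzw_map_by_chord_count (count : Int) (templates : List String) : Prop :=
  count = 1 ∨ count = 2 ∨ count = 4
instance (count : Int) (templates : List String) : Decidable (Pre_xyzw_map_by_chord_count count templates) := by unfold Pre_xyzw_map_by_chord_count; infer_instance

def pvWitness_xyzw_map_by_chord_count : Int × List String := (4, ["{a}-{b}{c}{d}", "{{a}}x"])

def Spec_xyzw_map_by_chord_count (count : Int) (templates : List String) (out : List String) : Prop := out = xyzw_map_by_chord_count_alt count templates
instance (count : Int) (templates : List String) (out : List String) : Decidable (Spec_xyzw_map_by_chord_count count templates out) := by unfold Spec_xyzw_map_by_chord_count; infer_instance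

-- ===== CLAIM (what is proved, stated in full; the proofs are below) =====
def Claim_equal_xyzw_map_by_chord_count : Prop := ∀ (count : Int) (templates : List String), Dom_xyzw_map_by_chord_count count templates → Pre_xyzw_map_by_chord_count count templates → Spec_xyzw_map_by_chord_count count templates (xyzw_map_by_chord_count count templates)

-- ===== LEMMAS AND PROOFS =====

-- Python's s.replace("{k}", v) (v one char), written as the structural recursion it performs.
def pvRep3 (k v : Char) : List Char → List Char
  | c1 :: c2 :: c3 :: rest =>
    if c1 = '{' ∧ c2 = k ∧ c3 = '}' then v :: pvRep3 k v rest
    else c1 :: pvRep3 k v (c2 :: c3 :: rest)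
  | l => l

theorem pvRep3_eq3 (k v c1 c2 c3 : Char) (rest : List Char) :
    pvRep3 k v (c1 :: c2 :: c3 :: rest) =
      if c1 = '{' ∧ c2 = k ∧ c3 = '}' then v :: pvRep3 k v rest
      else c1 :: pvRep3 k v (c2 :: c3 :: rest) := by
  simp [pvRep3]

theorem pvScan_eq3 (m : PySem.Dict Char Char) (c1 c2 c3 : Char) (rest : List Char) :
    pvScan m (c1 :: c2 :: c3 :: rest) =
      if c1 = '{' ∧ c3 = '}' ∧ m.contains c2 then m.getD c2 c2 :: pvScan m rest
      else c1 :: pvScan m (c2 :: c3 :: rest) := by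
  simp [pvScan]

theorem go3_eq (k v : Char) : ∀ (fuel : Nat) (l acc : List Char), l.length ≤ fuel →
    PySem.Chars.replace.go ['{', k, '}'] [v] fuel l acc = acc.reverse ++ pvRep3 k v l := by
  intro fuel
  induction fuel with
  | zero =>
    intro l acc h
    cases l with
    | nil => simp [PySem.Chars.replace.go, pvRep3]
    | cons c t => simp at h
  | succ fuel ih =>
    intro l acc h
    cases l with
    | nil => simp [PySem.Chars.replace.go, pvRep3]
    | cons c t =>
      rw [PySem.Chars.replace.go]
      by_cases hp : List.isPrefixOf ['{', k, '}'] (c :: t)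
      · cases t with
        | nil => simp [List.isPrefixOf] at hp
        | cons c2 t2 =>
          cases t2 with
          | nil => simp [List.isPrefixOf] at hp
          | cons c3 t3 =>
            simp only [List.isPrefixOf, Bool.and_eq_true, beq_iff_eq, List.isPrefixOf_nil_left,
              and_true, decide_eq_true_eq] at hp
            obtain ⟨rfl, rfl, rfl⟩ := hp
            rw [if_pos (by simp [List.isPrefixOf])]
            rw [pvRep3_eq3, if_pos ⟨rfl, rfl, rfl⟩]
            have hih := ih t3 (v :: acc) (by simp at h ⊢; omega)
            simpa using hih
      · rw [if_neg hp]
        have hih := ih t (c :: acc) (by simp at h ⊢; omega)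
        rw [hih]
        cases t with
        | nil => simp [pvRep3]
        | cons c2 t2 =>
          cases t2 with
          | nil => simp [pvRep3]
          | cons c3 t3 =>
            rw [pvRep3_eq3, if_neg (fun hc => hp (by simp [List.isPrefixOf, hc.1, hc.2.1, hc.2.2]))]
            simp

theorem replace_eq_pvRep3 (k v : Char) (s : List Char) :
    PySem.Chars.replace s ['{', k, '}'] [v] = pvRep3 k v s := by
  rw [PySem.Chars.replace]
  simp [go3_eq k v s.length s [] (le_refl _)]

theorem pvRep3_cons_ne (k v c : Char) (xs : List Char) (h : c ≠ '{') :
    pvRep3 k v (c :: xs) = c :: pvRep3 k v xs := by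
  match xs with
  | [] => rfl
  | [c2] => rfl
  | c2 :: c3 :: rest => rw [pvRep3_eq3, if_neg (fun hc => h hc.1)]

theorem pvRep3_cons_brace (k v : Char) (xs : List Char) (h : xs.take 2 ≠ [k, '}']) :
    pvRep3 k v ('{' :: xs) = '{' :: pvRep3 k v xs := by
  match xs with
  | [] => rfl
  | [c2] => rfl
  | c2 :: c3 :: rest =>
    rw [pvRep3_eq3, if_neg]
    intro hc
    exact h (by simp [List.take, hc.2.1, hc.2.2])

theorem pvRep3_take1 (k v c : Char) (xs : List Char) :
    (pvRep3 k v (c :: xs)).take 1 = [v] ∨ (pvRep3 k v (c :: xs)).take 1 = [c] := by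
  match xs with
  | [] => right; rfl
  | [c2] => right; rfl
  | c2 :: c3 :: r =>
    rw [pvRep3_eq3]
    split_ifs
    · left; rfl
    · right; rfl

theorem pvRep3_take2 (k v k' : Char) (hv1 : v ≠ k') (hv2 : v ≠ '}') (xs : List Char)
    (h : xs.take 2 ≠ [k', '}']) : (pvRep3 k v xs).take 2 ≠ [k', '}'] := by
  match xs with
  | [] => simpa [pvRep3] using h
  | [c] => simpa [pvRep3] using h
  | [c1, c2] => simpa [pvRep3] using h
  | c1 :: c2 :: c3 :: rest =>
    rw [pvRep3_eq3]
    split_ifs with hc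
    · intro hcon
      simp [List.take] at hcon
      exact hv1 hcon.1
    · intro hcon
      simp only [List.take_succ_cons, List.cons.injEq] at hcon
      obtain ⟨rfl, hcon2⟩ := hcon
      rcases pvRep3_take1 k v c2 (c3 :: rest) with hh | hh <;> rw [hh] at hcon2
      · exact hv2 (by simpa using hcon2)
      · exact h (by simp [List.take, (by simpa using hcon2 : c2 = '}')])

-- the core: four sequential replace passes equal one scan, for any mapping whose get? is the
-- four-key table with values avoiding '{', '}' and the keys
theorem chain_eq_scan (m : PySem.Dict Char Char) (v1 v2 v3 v4 : Char)
    (hget : ∀ c, m.get? c = if c = 'a' then some v1 else if c = 'b' then some v2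
      else if c = 'c' then some v3 else if c = 'd' then some v4 else none)
    (hv : ∀ v ∈ [v1, v2, v3, v4], v ≠ '{' ∧ v ≠ '}' ∧ v ≠ 'a' ∧ v ≠ 'b' ∧ v ≠ 'c' ∧ v ≠ 'd') :
    ∀ cs, pvRep3 'd' v4 (pvRep3 'c' v3 (pvRep3 'b' v2 (pvRep3 'a' v1 cs))) = pvScan m cs := by
  have h1v := hv v1 (by simp)
  have h2v := hv v2 (by simp)
  have h3v := hv v3 (by simp)
  have h4v := hv v4 (by simp)
  have hcont : ∀ c, m.contains c = (decide (c = 'a') || decide (c = 'b') || decide (c = 'c') || decide (c = 'd')) := by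
    intro c
    rw [PySem.Dict.contains_eq_isSome_get?, hget c]
    split_ifs with a b cc d <;> simp_all
  have hDa : m.getD 'a' 'a' = v1 := by rw [PySem.Dict.getD_eq_get?_getD, hget]; simp
  have hDb : m.getD 'b' 'b' = v2 := by rw [PySem.Dict.getD_eq_get?_getD, hget]; simp
  have hDc : m.getD 'c' 'c' = v3 := by rw [PySem.Dict.getD_eq_get?_getD, hget]; simp
  have hDd : m.getD 'd' 'd' = v4 := by rw [PySem.Dict.getD_eq_get?_getD, hget]; simp
  suffices H : ∀ (n : Nat) (cs : List Char), cs.length ≤ n →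
      pvRep3 'd' v4 (pvRep3 'c' v3 (pvRep3 'b' v2 (pvRep3 'a' v1 cs))) = pvScan m cs by
    exact fun cs => H cs.length cs le_rfl
  intro n
  induction n with
  | zero =>
    intro cs hlen
    cases cs with
    | nil => rfl
    | cons c t => simp at hlen
  | succ n ih =>
    intro cs hlen
    match cs with
    | [] => rfl
    | [c1] => rfl
    | [c1, c2] => rfl
    | c1 :: c2 :: c3 :: rest =>
      have hlen3 : rest.length + 3 ≤ n + 1 := by simpa using hlen
      by_cases h1 : c1 = '{'
      · subst h1
        by_cases hkey : c3 = '}' ∧ (c2 = 'a' ∨ c2 = 'b' ∨ c2 = 'c' ∨ c2 = 'd')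
        · obtain ⟨rfl, hk⟩ := hkey
          have hrest : rest.length ≤ n := by omega
          rcases hk with rfl | rfl | rfl | rfl
          · rw [pvRep3_eq3, if_pos ⟨rfl, rfl, rfl⟩,
              pvRep3_cons_ne 'b' v2 v1 _ h1v.1,
              pvRep3_cons_ne 'c' v3 v1 _ h1v.1,
              pvRep3_cons_ne 'd' v4 v1 _ h1v.1,
              pvScan_eq3, if_pos ⟨rfl, rfl, by rw [hcont]; decide⟩, hDa]
            exact congrArg _ (ih rest hrest)
          · have e1 : pvRep3 'a' v1 ('{' :: 'b' :: '}' :: rest) = '{' :: 'b' :: '}' :: pvRep3 'a' v1 rest := by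
              rw [pvRep3_eq3, if_neg (by simp),
                pvRep3_cons_ne 'a' v1 'b' _ (by decide), pvRep3_cons_ne 'a' v1 '}' _ (by decide)]
            rw [e1, pvRep3_eq3, if_pos ⟨rfl, rfl, rfl⟩,
              pvRep3_cons_ne 'c' v3 v2 _ h2v.1,
              pvRep3_cons_ne 'd' v4 v2 _ h2v.1,
              pvScan_eq3, if_pos ⟨rfl, rfl, by rw [hcont]; decide⟩, hDb]
            exact congrArg _ (ih rest hrest)
          · have e1 : pvRep3 'a' v1 ('{' :: 'c' :: '}' :: rest) = '{' :: 'c' :: '}' :: pvRep3 'a' v1 rest := by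
              rw [pvRep3_eq3, if_neg (by simp),
                pvRep3_cons_ne 'a' v1 'c' _ (by decide), pvRep3_cons_ne 'a' v1 '}' _ (by decide)]
            have e2 : pvRep3 'b' v2 ('{' :: 'c' :: '}' :: pvRep3 'a' v1 rest)
                = '{' :: 'c' :: '}' :: pvRep3 'b' v2 (pvRep3 'a' v1 rest) := by
              rw [pvRep3_eq3, if_neg (by simp),
                pvRep3_cons_ne 'b' v2 'c' _ (by decide), pvRep3_cons_ne 'b' v2 '}' _ (by decide)]
            rw [e1, e2, pvRep3_eq3, if_pos ⟨rfl, rfl, rfl⟩,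
              pvRep3_cons_ne 'd' v4 v3 _ h3v.1,
              pvScan_eq3, if_pos ⟨rfl, rfl, by rw [hcont]; decide⟩, hDc]
            exact congrArg _ (ih rest hrest)
          · have e1 : pvRep3 'a' v1 ('{' :: 'd' :: '}' :: rest) = '{' :: 'd' :: '}' :: pvRep3 'a' v1 rest := by
              rw [pvRep3_eq3, if_neg (by simp),
                pvRep3_cons_ne 'a' v1 'd' _ (by decide), pvRep3_cons_ne 'a' v1 '}' _ (by decide)]
            have e2 : pvRep3 'b' v2 ('{' :: 'd' :: '}' :: pvRep3 'a' v1 rest)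
                = '{' :: 'd' :: '}' :: pvRep3 'b' v2 (pvRep3 'a' v1 rest) := by
              rw [pvRep3_eq3, if_neg (by simp),
                pvRep3_cons_ne 'b' v2 'd' _ (by decide), pvRep3_cons_ne 'b' v2 '}' _ (by decide)]
            have e3 : pvRep3 'c' v3 ('{' :: 'd' :: '}' :: pvRep3 'b' v2 (pvRep3 'a' v1 rest))
                = '{' :: 'd' :: '}' :: pvRep3 'c' v3 (pvRep3 'b' v2 (pvRep3 'a' v1 rest)) := by
              rw [pvRep3_eq3, if_neg (by simp),
                pvRep3_cons_ne 'c' v3 'd' _ (by decide), pvRep3_cons_ne 'c' v3 '}' _ (by decide)]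
            rw [e1, e2, e3, pvRep3_eq3, if_pos ⟨rfl, rfl, rfl⟩,
              pvScan_eq3, if_pos ⟨rfl, rfl, by rw [hcont]; decide⟩, hDd]
            exact congrArg _ (ih rest hrest)
        · have hta : (c2 :: c3 :: rest).take 2 ≠ ['a', '}'] := by
            intro hc; simp [List.take] at hc; exact hkey ⟨hc.2, Or.inl hc.1⟩
          have htb : (c2 :: c3 :: rest).take 2 ≠ ['b', '}'] := by
            intro hc; simp [List.take] at hc; exact hkey ⟨hc.2, Or.inr (Or.inl hc.1)⟩
          have htc : (c2 :: c3 :: rest).take 2 ≠ ['c', '}'] := by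
            intro hc; simp [List.take] at hc; exact hkey ⟨hc.2, Or.inr (Or.inr (Or.inl hc.1))⟩
          have htd : (c2 :: c3 :: rest).take 2 ≠ ['d', '}'] := by
            intro hc; simp [List.take] at hc; exact hkey ⟨hc.2, Or.inr (Or.inr (Or.inr hc.1))⟩
          rw [pvRep3_cons_brace 'a' v1 _ hta,
            pvRep3_cons_brace 'b' v2 _ (pvRep3_take2 'a' v1 'b' h1v.2.2.2.1 h1v.2.1 _ htb),
            pvRep3_cons_brace 'c' v3 _
              (pvRep3_take2 'b' v2 'c' h2v.2.2.2.2.1 h2v.2.1 _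
                (pvRep3_take2 'a' v1 'c' h1v.2.2.2.2.1 h1v.2.1 _ htc)),
            pvRep3_cons_brace 'd' v4 _
              (pvRep3_take2 'c' v3 'd' h3v.2.2.2.2.2 h3v.2.1 _
                (pvRep3_take2 'b' v2 'd' h2v.2.2.2.2.2 h2v.2.1 _
                  (pvRep3_take2 'a' v1 'd' h1v.2.2.2.2.2 h1v.2.1 _ htd)))]
          rw [pvScan_eq3, if_neg]
          · exact congrArg _ (ih (c2 :: c3 :: rest) (by simp; omega))
          · intro hc
            obtain ⟨-, h3, hcc⟩ := hc
            rw [hcont] at hcc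
            simp only [Bool.or_eq_true, decide_eq_true_eq] at hcc
            exact hkey ⟨h3, by tauto⟩
      · rw [pvRep3_cons_ne 'a' v1 c1 _ h1, pvRep3_cons_ne 'b' v2 c1 _ h1,
          pvRep3_cons_ne 'c' v3 c1 _ h1, pvRep3_cons_ne 'd' v4 c1 _ h1,
          pvScan_eq3, if_neg (fun hc => h1 hc.1)]
        exact congrArg _ (ih (c2 :: c3 :: rest) (by simp; omega))

theorem hget_ofList (v1 v2 v3 v4 : Char) (c : Char) :
    (PySem.Dict.ofList [('a', v1), ('b', v2), ('c', v3), ('d', v4)]).get? c =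
      if c = 'a' then some v1 else if c = 'b' then some v2
      else if c = 'c' then some v3 else if c = 'd' then some v4 else none := by
  have e : PySem.Dict.ofList [('a', v1), ('b', v2), ('c', v3), ('d', v4)]
      = PySem.Dict.mk [('a', v1), ('b', v2), ('c', v3), ('d', v4)] := rfl
  rw [e, PySem.Dict.get?_mk_cons, PySem.Dict.get?_mk_cons, PySem.Dict.get?_mk_cons,
    PySem.Dict.get?_mk_cons]
  by_cases h1 : c = 'a'; · simp [h1]
  by_cases h2 : c = 'b'; · simp [h1, h2]
  by_cases h3 : c = 'c'; · simp [h1, h2, h3]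
  by_cases h4 : c = 'd'; · simp [h1, h2, h3, h4]
  have n1 : ('a' == c) = false := by simp; exact fun e => h1 e.symm
  have n2 : ('b' == c) = false := by simp; exact fun e => h2 e.symm
  have n3 : ('c' == c) = false := by simp; exact fun e => h3 e.symm
  have n4 : ('d' == c) = false := by simp; exact fun e => h4 e.symm
  rw [if_neg (by simp [n1]), if_neg (by simp [n2]), if_neg (by simp [n3]), if_neg (by simp [n4]),
    if_neg h1, if_neg h2, if_neg h3, if_neg h4]
  rfl

-- A's per-template fold of four replaces equals B's per-template scan
theorem per_template (m : PySem.Dict Char Char) (v1 v2 v3 v4 : Char)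
    (hget : ∀ c, m.get? c = if c = 'a' then some v1 else if c = 'b' then some v2
      else if c = 'c' then some v3 else if c = 'd' then some v4 else none)
    (hv : ∀ v ∈ [v1, v2, v3, v4], v ≠ '{' ∧ v ≠ '}' ∧ v ≠ 'a' ∧ v ≠ 'b' ∧ v ≠ 'c' ∧ v ≠ 'd')
    (t : String) :
    PySem.Str.replace (PySem.Str.replace (PySem.Str.replace (PySem.Str.replace t "{a}"
        (String.ofList [v1])) "{b}" (String.ofList [v2])) "{c}" (String.ofList [v3])) "{d}"
        (String.ofList [v4])
      = String.ofList (pvScan m t.toList) := by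
  have hinj : ∀ a b : String, a.toList = b.toList → a = b := fun a b h => by
    have := congrArg String.ofList h
    simpa [String.ofList_toList] using this
  apply hinj
  rw [String.toList_ofList, PySem.Str.toList_replace, PySem.Str.toList_replace,
    PySem.Str.toList_replace, PySem.Str.toList_replace]
  rw [show ("{a}" : String).toList = ['{', 'a', '}'] from rfl,
    show ("{b}" : String).toList = ['{', 'b', '}'] from rfl,
    show ("{c}" : String).toList = ['{', 'c', '}'] from rfl,
    show ("{d}" : String).toList = ['{', 'd', '}'] from rfl,
    String.toList_ofList, String.toList_ofList, String.toList_ofList, String.toList_ofList]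
  rw [replace_eq_pvRep3, replace_eq_pvRep3, replace_eq_pvRep3, replace_eq_pvRep3]
  exact chain_eq_scan m v1 v2 v3 v4 hget hv t.toList

theorem foldl_append_map {α β : Type} (f : α → β) (l : List α) :
    ∀ acc : List β, l.foldl (fun copy t => copy ++ [f t]) acc = acc ++ l.map f := by
  induction l with
  | nil => simp
  | cons x xs ih => intro acc; simp [List.foldl, ih]

-- ===== VERDICT (by name: the statement is the Claim_ definition above) =====
set_option maxRecDepth 8192 in
theorem xyzw_map_by_chord_count_spec : Claim_equal_xyzw_map_by_chord_count := by
  intro count templates _ hpre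
  unfold Spec_xyzw_map_by_chord_count
  rcases hpre with rfl | rfl | rfl
  · show templates.foldl (fun copy t => copy ++
        [[("a", "X"), ("b", "X"), ("c", "X"), ("d", "X")].foldl
          (fun t kv => PySem.Str.replace t ("{" ++ kv.1 ++ "}") kv.2) t]) []
      = templates.map (fun t => String.ofList
          (pvScan (PySem.Dict.ofList [('a', 'X'), ('b', 'X'), ('c', 'X'), ('d', 'X')]) t.toList))
    rw [foldl_append_map, List.nil_append]
    refine List.map_congr_left fun t _ => ?_
    exact per_template _ 'X' 'X' 'X' 'X' (hget_ofList _ _ _ _)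
      (by intro v hv; fin_cases hv <;> exact ⟨by decide, by decide, by decide, by decide, by decide, by decide⟩) t
  · show templates.foldl (fun copy t => copy ++
        [[("a", "X"), ("b", "X"), ("c", "Y"), ("d", "Y")].foldl
          (fun t kv => PySem.Str.replace t ("{" ++ kv.1 ++ "}") kv.2) t]) []
      = templates.map (fun t => String.ofList
          (pvScan (PySem.Dict.ofList [('a', 'X'), ('b', 'X'), ('c', 'Y'), ('d', 'Y')]) t.toList))
    rw [foldl_append_map, List.nil_append]
    refine List.map_congr_left fun t _ => ?_
    exact per_template _ 'X' 'X' 'Y' 'Y' (hget_ofList _ _ _ _)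
      (by intro v hv; fin_cases hv <;> exact ⟨by decide, by decide, by decide, by decide, by decide, by decide⟩) t
  · show templates.foldl (fun copy t => copy ++
        [[("a", "X"), ("b", "Y"), ("c", "Z"), ("d", "W")].foldl
          (fun t kv => PySem.Str.replace t ("{" ++ kv.1 ++ "}") kv.2) t]) []
      = templates.map (fun t => String.ofList
          (pvScan (PySem.Dict.ofList [('a', 'X'), ('b', 'Y'), ('c', 'Z'), ('d', 'W')]) t.toList))
    rw [foldl_append_map, List.nil_append]
    refine List.map_congr_left fun t _ => ?_
    exact per_template _ 'X' 'Y' 'Z' 'W' (hget_ofList _ _ _ _)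
      (by intro v hv; fin_cases hv <;> exact ⟨by decide, by decide, by decide, by decide, by decide, by decide⟩) t
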